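-- pv_equiv track=rewrite | github.com/subhuti2/hub | paradox/backups/vic3_read_and _write_history_states_without_re.py | parse_word
-- ===== SOURCE A (Python) =====
-- def skip_whitespace_and_comments(text, index):
--     """Skip over whitespace and comments starting with '#'."""
--     length = len(text)
--     while index < length:
--         c = text[index]
--         if c in ' \t\n\r':
--             index += 1
--         elif c == '#':
--             # Skip to end of line
--             while index < length and text[index] != '\n':
--                 index += 1
--         else:
--             break
--     return index
--
-- def parse_word(text, index):
--     """Parse a word starting at index, handling quoted strings."""
--     index = skip_whitespace_and_comments(text, index)
--     length = len(text)
--     if index >= length: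
--         return '', index
--     c = text[index]
--     if c == '"':
--         # Parse a quoted string
--         index += 1  # skip opening quote
--         start = index
--         while index < length and text[index] != '"':
--             index += 1
--         word = text[start:index]
--         index += 1  # skip closing quote
--     else:
--         # Parse an unquoted word
--         start = index
--         while index < length:
--             c = text[index]
--             if c in ' \t\n\r={}':
--                 break
--             else:
--                 index += 1
--         word = text[start:index]
--     return word, index
-- ===== SOURCE B (Python) =====
-- WS = ' \t\n\r'
-- DELIMS = ' \t\n\r={}'
--
-- def _skip(text, index):
--     """Position of the first significant char at or after index:
--     processes the text line by line, dropping blank and '#'-comment lines."""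
--     n = len(text)
--     i = index
--     while i < n:
--         nl = text.find('\n', i)
--         end = n if nl == -1 else nl
--         s = text[i:end].lstrip(WS)
--         if s and not s.startswith('#'):
--             return end - len(s)
--         i = end + 1
--     return n
--
-- def parse_word(text, index):
--     """Parse a word starting at index, handling quoted strings."""
--     n = len(text)
--     if index >= n:
--         return '', index
--     pos = _skip(text, index)
--     if pos >= n:
--         return '', pos
--     if text[pos] == '"':
--         end = text.find('"', pos + 1)
--         if end == -1:
--             return text[pos + 1:], n + 1
--         return text[pos + 1:end], end + 1
--     w = next((k for k in range(pos, n) if text[k] in DELIMS), n)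
--     return text[pos:w], w
-- ===== Notes on version B (the rewrite author's own statement) =====
-- stated objective: alternative
-- what changed: A scans character by character with nested index loops for whitespace, comments, quoted strings and words; B processes the text line-by-line, locating boundaries with str.find/lstrip/slicing and keeping only index arithmetic in Python.
-- outside the precondition, e.g. on parse_word('a b', -1): A returns ('', 1), B returns ('b', 3)
import Mathlib
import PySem

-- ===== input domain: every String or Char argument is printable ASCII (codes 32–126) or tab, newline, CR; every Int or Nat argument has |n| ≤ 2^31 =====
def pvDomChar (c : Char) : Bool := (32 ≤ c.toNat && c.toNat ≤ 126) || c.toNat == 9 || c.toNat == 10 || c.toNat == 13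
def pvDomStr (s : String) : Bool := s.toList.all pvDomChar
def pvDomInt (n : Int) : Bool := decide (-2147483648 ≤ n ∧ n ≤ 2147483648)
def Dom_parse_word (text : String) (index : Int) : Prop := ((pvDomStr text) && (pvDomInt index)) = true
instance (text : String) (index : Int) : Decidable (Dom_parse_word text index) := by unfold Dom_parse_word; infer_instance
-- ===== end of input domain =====

-- B replaces A's char-by-char whitespace/comment scanning by a line-oriented scanner built on
-- str.find / lstrip / slices (objective: alternative decomposition, same O(n) cost); values agree on Pre_ (0 ≤ index).

-- ===== PORT A =====
-- character classes of A: `c in ' \t\n\r'` and `c in ' \t\n\r={}'` (single-char membership, exact)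
def pvIsWS (c : Char) : Bool := c == ' ' || c == '\t' || c == '\n' || c == '\r'
def pvIsDelim (c : Char) : Bool := pvIsWS c || c == '=' || c == '{' || c == '}'

-- shape of A's three inner loops: `while index < length and not stop(text[index]): index += 1`;
-- fuel-based structural recursion: with fuel ≥ cs.length - i it is exactly that loop (index
-- strictly increases each iteration), and all call sites below supply that much
def pvScanA (stop : Char → Bool) (cs : List Char) : Nat → Nat → Nat
  | 0, i => i
  | fuel + 1, i =>
    if h : i < cs.length then
      if stop cs[i] then i else pvScanA stop cs fuel (i + 1)
    else i

-- skip_whitespace_and_comments, with the inner `#`-loop as pvScanA (· == '\n') (same fuel rule)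
def pvSkipA (cs : List Char) : Nat → Nat → Nat
  | 0, i => i
  | fuel + 1, i =>
    if h : i < cs.length then
      if pvIsWS cs[i] then pvSkipA cs fuel (i + 1)
      else if cs[i] = '#' then pvSkipA cs fuel (pvScanA (· == '\n') cs (cs.length - i) i)
      else i
    else i

-- A itself; index.toNat is Python's index exactly on Pre_ (0 ≤ index); slices of Nat bounds are drop/take
def parse_word (text : String) (index : Int) : String × Int :=
  let cs := text.toList
  let i := pvSkipA cs (cs.length - index.toNat) index.toNat
  if i ≥ cs.length then ("", (i : Int))
  else
    let c := cs.getD i ' '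
    if c = '"' then
      let j := pvScanA (· == '"') cs (cs.length - (i + 1)) (i + 1)
      (String.ofList ((cs.drop (i + 1)).take (j - (i + 1))), (j : Int) + 1)
    else
      let j := pvScanA pvIsDelim cs (cs.length - i) i
      (String.ofList ((cs.drop i).take (j - i)), (j : Int))

-- ===== PORT B =====
-- _skip of Source B: line-by-line via text.find('\n', i) and lstrip(' \t\n\r') (= dropWhile pvIsWS, exact);
-- fuel ≥ cs.length + 1 - i suffices (i advances past a whole line each iteration), supplied below
def pvSkipB (cs : List Char) : Nat → Nat → Nat
  | 0, _ => cs.length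
  | fuel + 1, i =>
    if _h : i < cs.length then
      let nl := PySem.Chars.findFrom cs ['\n'] (i : Int) none
      let e := if nl = -1 then cs.length else nl.toNat
      let s := (PySem.List.slice cs (some (i : Int)) (some (e : Int))).dropWhile pvIsWS
      if s ≠ [] ∧ s.head? ≠ some '#' then e - s.length
      else pvSkipB cs fuel (e + 1)
    else cs.length

-- B itself; index.toNat exact on Pre_; `next((k for k in range(pos,n) if text[k] in DELIMS), n)`
-- is pos + findIdx on the suffix (findIdx returns the length when nothing matches, i.e. n overall)
def parse_word_alt (text : String) (index : Int) : String × Int :=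
  let cs := text.toList
  let n := cs.length
  if index ≥ (n : Int) then ("", index)
  else
    let pos := pvSkipB cs (n + 1 - index.toNat) index.toNat
    if pos ≥ n then ("", (pos : Int))
    else if cs.getD pos ' ' = '"' then
      let e := PySem.Chars.findFrom cs ['"'] ((pos : Int) + 1) none
      if e = -1 then (String.ofList (cs.drop (pos + 1)), (n : Int) + 1)
      else (String.ofList ((cs.drop (pos + 1)).take (e.toNat - (pos + 1))), e + 1)
    else
      let w := pos + (cs.drop pos).findIdx pvIsDelim
      (String.ofList ((cs.drop pos).take (w - pos)), (w : Int))

-- ===== PRECONDITION & SPEC =====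
-- Pre_ restricts to the parser's natural domain of non-negative positions: for index < 0 Python's
-- negative-index wraparound makes A's behaviour (an accidental value, or an IndexError when
-- index < -len(text)) meaningless.
def Pre_parse_word (text : String) (index : Int) : Prop := 0 ≤ index
instance (text : String) (index : Int) : Decidable (Pre_parse_word text index) := by unfold Pre_parse_word; infer_instance
def pvWitness_parse_word : String × Int := ("  # c\n ab=1", 0)

def Spec_parse_word (text : String) (index : Int) (out : String × Int) : Prop := out = parse_word_alt text index
instance (text : String) (index : Int) (out : String × Int) : Decidable (Spec_parse_word text index out) := by unfold Spec_parse_word; infer_instance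

-- ===== CLAIM (what is proved, stated in full; the proofs are below) =====
def Claim_equal_parse_word : Prop := ∀ (text : String) (index : Int), Dom_parse_word text index → Pre_parse_word text index → Spec_parse_word text index (parse_word text index)

-- ===== LEMMAS AND PROOFS =====

theorem pvFindIdx_eq_of (p : Char → Bool) (l : List Char) (m : Nat) (hm : m < l.length)
    (hp : p l[m] = true) (hlt : ∀ k (hk : k < m), p (l[k]'(by omega)) = false) :
    l.findIdx p = m := by
  have h1 : l.findIdx p ≤ m := by
    by_contra hc
    push_neg at hc
    have := List.not_of_lt_findIdx hc (xs := l)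
    exact Bool.noConfusion (hp.symm.trans this)
  have h2 : ¬ l.findIdx p < m := by
    intro hc
    have hg := List.findIdx_getElem (p := p) (xs := l) (w := by omega)
    rw [hlt _ hc] at hg
    exact Bool.false_ne_true hg
  omega

theorem pvScanA_eq (stop : Char → Bool) (cs : List Char) :
    ∀ fuel i, cs.length - i ≤ fuel →
      pvScanA stop cs fuel i = i + (cs.drop i).findIdx stop := by
  intro fuel
  induction fuel with
  | zero =>
    intro i h
    have : cs.length ≤ i := by omega
    simp [pvScanA, List.drop_eq_nil_of_le this]
  | succ fuel ih =>
    intro i h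
    rw [pvScanA]
    split
    · next hlt =>
      rw [List.drop_eq_getElem_cons hlt, List.findIdx_cons]
      split
      · next hs => simp [hs]
      · next hs =>
        simp only [hs, cond_false]
        rw [ih (i + 1) (by omega)]
        omega
    · next hge =>
      simp [List.drop_eq_nil_of_le (by omega : cs.length ≤ i)]

theorem pvFind_single (l : List Char) (c : Char) :
    PySem.Chars.find l [c] = if c ∈ l then ((l.findIdx (· == c) : Nat) : Int) else -1 := by
  split
  · next hmem =>
    have hinf : [c] <:+: l := (List.singleton_infix_iff c l).mpr hmem
    have hnn : 0 ≤ PySem.Chars.find l [c] := (PySem.Chars.find_nonneg_iff l [c]).mpr hinf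
    obtain ⟨hpre, hmin⟩ := PySem.Chars.find_spec (s := l) (sub := [c]) hnn
    set f := (PySem.Chars.find l [c]).toNat with hf
    have hchar : ∀ j, [c] <+: l.drop j ↔ l[j]? = some c := by
      intro j
      rw [← List.head?_drop]
      cases hdj : l.drop j with
      | nil => simp
      | cons a t => simp [List.cons_prefix_cons, eq_comm]
    have hfc : l[f]? = some c := (hchar f).mp hpre
    have hflt : f < l.length := by
      by_contra hcc
      push_neg at hcc
      rw [List.getElem?_eq_none hcc] at hfc
      simp at hfc
    have : l.findIdx (· == c) = f := by
      apply pvFindIdx_eq_of _ _ _ hflt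
      · rw [List.getElem?_eq_getElem hflt] at hfc
        simp [Option.some_inj.mp hfc]
      · intro k hk
        have := hmin k hk
        rw [hchar k] at this
        rw [List.getElem?_eq_getElem (by omega : k < l.length)] at this
        exact beq_eq_false_iff_ne.mpr (fun he => this (by rw [he]))
    rw [this, hf]
    omega
  · next hmem =>
    rw [PySem.Chars.find_eq_neg_one_iff]
    intro hinf
    exact hmem ((List.singleton_infix_iff c l).mp hinf)

theorem pvSkipA_end (cs : List Char) : ∀ fuel i, cs.length ≤ i → pvSkipA cs fuel i = i := by
  intro fuel i h
  cases fuel with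
  | zero => rfl
  | succ g => rw [pvSkipA]; simp [Nat.not_lt.mpr h]

theorem pvSkipB_end (cs : List Char) : ∀ fuel i, cs.length ≤ i → pvSkipB cs fuel i = cs.length := by
  intro fuel i h
  cases fuel with
  | zero => rfl
  | succ g => rw [pvSkipB]; simp [Nat.not_lt.mpr h]

-- the '#' branch strictly advances

theorem pvScanA_hash (cs : List Char) (i : Nat) (h : i < cs.length) (hc : cs[i] = '#') :
    pvScanA (· == '\n') cs (cs.length - i) i
      = i + 1 + ((cs.drop (i + 1)).findIdx (· == '\n')) := by
  rw [pvScanA_eq _ _ _ i (le_refl _)]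
  rw [List.drop_eq_getElem_cons h, List.findIdx_cons]
  simp [hc]
  omega

theorem pvSkipA_fuel_congr (cs : List Char) :
    ∀ f1 f2 i, cs.length - i ≤ f1 → cs.length - i ≤ f2 →
      pvSkipA cs f1 i = pvSkipA cs f2 i := by
  intro f1
  induction f1 with
  | zero =>
    intro f2 i h1 h2
    have hi : cs.length ≤ i := by omega
    rw [pvSkipA_end cs 0 i hi, pvSkipA_end cs f2 i hi]
  | succ g ih =>
    intro f2 i h1 h2
    by_cases hi : i < cs.length
    · cases f2 with
      | zero => omega
      | succ g2 =>
        rw [pvSkipA, pvSkipA]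
        simp only [dif_pos hi]
        split
        · exact ih g2 (i+1) (by omega) (by omega)
        · split
          · next hc =>
            have hj := pvScanA_hash cs i hi hc
            set j := pvScanA (· == '\n') cs (cs.length - i) i with hjdef
            exact ih g2 j (by omega) (by omega)
          · rfl
    · rw [pvSkipA_end cs _ i (by omega), pvSkipA_end cs _ i (by omega)]

theorem pvSkipA_le (cs : List Char) : ∀ fuel i, i ≤ cs.length →
    pvSkipA cs fuel i ≤ cs.length := by
  intro fuel
  induction fuel with
  | zero => intro i h; exact h
  | succ g ih =>
    intro i h
    rw [pvSkipA]
    split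
    · next hi =>
      split
      · exact ih (i+1) (by omega)
      · split
        · next hc =>
          apply ih
          rw [pvScanA_hash cs i hi hc]
          have := List.findIdx_le_length (p := (· == '\n')) (xs := cs.drop (i+1))
          simp [List.length_drop] at this
          omega
        · exact h
    · exact h

theorem pvSkipA_run (cs : List Char) (m : Nat) : ∀ fuel i (him : i + m ≤ cs.length)
    (hfuel : cs.length - i ≤ fuel)
    (hws : ∀ k (hk : k < m), pvIsWS (cs[i + k]'(by omega)) = true),
    pvSkipA cs fuel i = pvSkipA cs (cs.length - (i + m)) (i + m) := by
  induction m with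
  | zero =>
    intro fuel i him hfuel _
    exact pvSkipA_fuel_congr cs fuel (cs.length - (i+0)) i (by omega) (by omega)
  | succ m ih =>
    intro fuel i him hfuel hws
    have hi : i < cs.length := by omega
    rw [pvSkipA_fuel_congr cs fuel ((cs.length - i - 1) + 1) i hfuel (by omega), pvSkipA]
    simp only [dif_pos hi]
    rw [if_pos (by simpa using hws 0 (by omega))]
    have := ih (cs.length - i - 1) (i+1) (by omega) (by omega)
      (fun k hk => by
        have := hws (k+1) (by omega)
        simpa [Nat.add_assoc, Nat.add_comm 1 k] using this)
    rw [this]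
    have he : i + 1 + m = i + (m + 1) := by omega
    rw [he]

theorem pvFindIdx_drop (p : Char → Bool) : ∀ (j : Nat) (l : List Char), j ≤ l.findIdx p →
    (l.drop j).findIdx p = l.findIdx p - j := by
  intro j
  induction j with
  | zero => simp
  | succ j ih =>
    intro l hj
    cases l with
    | nil => simp
    | cons a l' =>
      rw [List.findIdx_cons] at hj ⊢
      by_cases hpa : p a
      · simp [hpa] at hj
      · simp only [hpa, cond_false] at hj ⊢
        simp only [List.drop_succ_cons]
        rw [ih l' (by omega)]
        omega

theorem pvSkip_eq (cs : List Char) : ∀ fuel i, i ≤ cs.length → cs.length - i < fuel →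
    pvSkipB cs fuel i = pvSkipA cs (cs.length - i) i := by
  intro fuel
  induction fuel with
  | zero => intro i h hf; omega
  | succ g ih =>
    intro i hle hf
    by_cases hi : i < cs.length
    case neg =>
      rw [pvSkipB_end cs _ i (by omega), pvSkipA_end cs _ i (by omega)]
      omega
    case pos =>
      rw [pvSkipB]
      simp only [dif_pos hi]
      set t := cs.drop i with ht
      set K := t.findIdx (· == '\n') with hK
      have htlen : t.length = cs.length - i := by rw [ht]; exact List.length_drop
      have hKle : K ≤ t.length := List.findIdx_le_length
      have hnl := PySem.Chars.findFrom_natCast cs ['\n'] i (by omega)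
      have hfind := pvFind_single t '\n'
      rw [← hK] at hfind
      have he : (if PySem.Chars.findFrom cs ['\n'] ((i : Nat) : Int) none = -1 then cs.length
          else (PySem.Chars.findFrom cs ['\n'] ((i : Nat) : Int) none).toNat) = i + K := by
        rw [hnl, ← ht, hfind]
        by_cases hmem : '\n' ∈ t
        · rw [if_pos hmem, if_neg (by omega : ¬((K : Int) = -1)), if_neg (by omega)]
          omega
        · have hKeq : K = t.length := by
            rw [hK, List.findIdx_eq_length]
            intro a ha
            exact beq_eq_false_iff_ne.mpr (fun h => hmem (h ▸ ha))
          rw [if_neg hmem]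
          norm_num
          omega
      rw [he]
      rw [PySem.List.slice_natCast, ← ht, Nat.add_sub_cancel_left]
      rw [List.dropWhile_eq_drop_findIdx_not]
      set ln := t.take K with hline
      set M := ln.findIdx (fun c => !(pvIsWS c)) with hM
      have hlinelen : ln.length = K := by rw [hline, List.length_take]; omega
      have hMle : M ≤ K := by
        have := List.findIdx_le_length (p := fun c => !(pvIsWS c)) (xs := ln)
        omega
      have hlineChar : ∀ k (hk : k < K), (ln[k]'(by omega)) = (cs[i + k]'(by omega)) := by
        intro k hk
        simp [hline, ht, List.getElem_take, List.getElem_drop]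
      have hMws : ∀ k (hk : k < M), pvIsWS (cs[i + k]'(by omega)) = true := by
        intro k hk
        have hnot := List.not_of_lt_findIdx (xs := ln) (p := fun c => !(pvIsWS c)) (by omega)
        rw [← hlineChar k (by omega)]
        simpa using hnot
      have hslen : (ln.drop M).length = K - M := by rw [List.length_drop]; omega
      -- the continuation behind the first real line: both sides continue at i + K (+1)
      have htail : pvSkipB cs g (i + K + 1) = pvSkipA cs (cs.length - (i + K)) (i + K) := by
        by_cases hKlt : K < t.length
        · have hKn : (t[K]'hKlt) = '\n' := by
            have := List.findIdx_getElem (p := (· == '\n')) (xs := t) (w := by omega)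
            simpa [← hK] using this
          have hiK : i + K < cs.length := by omega
          obtain ⟨g', hg'⟩ : ∃ g', cs.length - (i + K) = g' + 1 := ⟨cs.length - (i + K) - 1, by omega⟩
          rw [hg', pvSkipA]
          simp only [dif_pos hiK]
          have h2 : (t[K]'hKlt) = (cs[i + K]'hiK) := by
            simp [ht, List.getElem_drop]
          have hcseq : (cs[i + K]'hiK) = '\n' := by rw [← h2]; exact hKn
          rw [if_pos (by rw [hcseq]; decide)]
          have hg'' : g' = cs.length - (i + K + 1) := by omega
          rw [hg'']
          exact ih (i + K + 1) (by omega) (by omega)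
        · have hKn : i + K = cs.length := by omega
          rw [hKn, pvSkipB_end cs g _ (by omega), pvSkipA_end cs _ _ (by omega)]
      by_cases hMK : M < K
      · have hhead : (ln.drop M).head? = some (ln[M]'(by omega)) := by
          rw [List.head?_drop, List.getElem?_eq_getElem (by omega)]
        by_cases hhash : ln[M]'(by omega) = '#'
        · rw [if_neg (fun hcon => hcon.2 (by rw [hhead, hhash]))]
          have hrun := pvSkipA_run cs M (cs.length - i) i (by omega) (by omega) hMws
          rw [hrun]
          have hiM : i + M < cs.length := by omega
          obtain ⟨g2, hg2⟩ : ∃ g2, cs.length - (i + M) = g2 + 1 := ⟨cs.length - (i + M) - 1, by omega⟩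
          rw [hg2, pvSkipA]
          simp only [dif_pos hiM]
          have hMchar : (!(pvIsWS (ln[M]'(by omega)))) = true :=
            List.findIdx_getElem (p := fun c => !(pvIsWS c)) (xs := ln) (w := by omega)
          have hwsf : pvIsWS (cs[i + M]'hiM) = false := by
            rw [← hlineChar M (by omega)]
            simpa using hMchar
          rw [if_neg (by simp [hwsf])]
          rw [if_pos (by rw [← hlineChar M (by omega)]; exact hhash)]
          have hscan := pvScanA_hash cs (i + M) hiM (by rw [← hlineChar M (by omega)]; exact hhash)
          have hdd : cs.drop (i + M + 1) = t.drop (M + 1) := by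
            rw [ht, List.drop_drop]
            congr 1 <;> omega
          have hfi : (t.drop (M + 1)).findIdx (· == '\n') = K - (M + 1) := by
            rw [pvFindIdx_drop (· == '\n') (M + 1) t (by omega), ← hK]
          have hscan2 : pvScanA (· == '\n') cs (cs.length - (i + M)) (i + M) = i + K := by
            rw [hscan, hdd, hfi]; omega
          rw [hscan2]
          rw [pvSkipA_fuel_congr cs g2 (cs.length - (i + K)) (i + K) (by omega) (by omega)]
          exact htail
        · rw [if_pos ⟨by
                apply List.ne_nil_of_length_pos
                rw [hslen]
                omega,
              by rw [hhead]; simp [hhash]⟩]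
          have hrun := pvSkipA_run cs M (cs.length - i) i (by omega) (by omega) hMws
          rw [hrun]
          have hiM : i + M < cs.length := by omega
          obtain ⟨g2, hg2⟩ : ∃ g2, cs.length - (i + M) = g2 + 1 := ⟨cs.length - (i + M) - 1, by omega⟩
          rw [hg2, pvSkipA]
          simp only [dif_pos hiM]
          have hMchar : (!(pvIsWS (ln[M]'(by omega)))) = true :=
            List.findIdx_getElem (p := fun c => !(pvIsWS c)) (xs := ln) (w := by omega)
          have hwsf : pvIsWS (cs[i + M]'hiM) = false := by
            rw [← hlineChar M (by omega)]
            simpa using hMchar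
          rw [if_neg (by simp [hwsf])]
          rw [if_neg (by rw [← hlineChar M (by omega)]; exact hhash)]
          rw [hslen]
          omega
      · have hMKe : M = K := by omega
        have hnil : ln.drop M = [] := List.drop_eq_nil_of_le (by omega)
        rw [if_neg (by simp [hnil])]
        have hrun := pvSkipA_run cs K (cs.length - i) i (by omega) (by omega)
          (fun k hk => hMws k (by omega))
        rw [hrun]
        exact htail

theorem pv_main (text : String) (index : Int) (hpre : 0 ≤ index) :
    parse_word text index = parse_word_alt text index := by
  unfold parse_word parse_word_alt
  dsimp only
  set cs := text.toList with hcs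
  by_cases hbig : index ≥ ((cs.length : Nat) : Int)
  · rw [if_pos hbig]
    rw [pvSkipA_end cs _ index.toNat (by omega)]
    rw [if_pos (by omega)]
    simp only [Prod.mk.injEq]
    exact ⟨trivial, by omega⟩
  · rw [if_neg hbig]
    have hi0 : index.toNat < cs.length := by omega
    have hskip := pvSkip_eq cs (cs.length + 1 - index.toNat) index.toNat (by omega) (by omega)
    rw [hskip]
    set j := pvSkipA cs (cs.length - index.toNat) index.toNat with hj
    have hjle : j ≤ cs.length := pvSkipA_le cs _ index.toNat (by omega)
    by_cases hend : j ≥ cs.length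
    · rw [if_pos hend, if_pos hend]
    · rw [if_neg hend, if_neg hend]
      by_cases hq : cs.getD j ' ' = '"'
      · rw [if_pos hq, if_pos hq]
        set u := cs.drop (j + 1) with hu
        have hulen : u.length = cs.length - (j + 1) := by rw [hu]; exact List.length_drop
        have hscan := pvScanA_eq (· == '"') cs (cs.length - (j + 1)) (j + 1) (le_refl _)
        rw [← hu] at hscan
        have hcast : ((j : Nat) : Int) + 1 = (((j + 1 : Nat)) : Int) := by push_cast; ring
        rw [hcast, PySem.Chars.findFrom_natCast cs ['"'] (j + 1) (by omega), ← hu]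
        have hfs := pvFind_single u '"'
        by_cases hqm : '"' ∈ u
        · have hKlt : u.findIdx (· == '"') < u.length :=
            List.findIdx_lt_length_of_exists ⟨'"', hqm, by simp⟩
          have hfv : PySem.Chars.find u ['"'] = ((u.findIdx (· == '"') : Nat) : Int) := by
            rw [hfs, if_pos hqm]
          rw [hfv]
          rw [if_neg (by omega : ¬(((u.findIdx (· == '"') : Nat) : Int) = -1))]
          rw [if_neg (by omega)]
          have h1 : j + 1 + u.findIdx (· == '"') - (j + 1) = u.findIdx (· == '"') := by omega
          have h2 : ((((j + 1 : Nat)) : Int) + ((u.findIdx (· == '"') : Nat) : Int)).toNat - (j + 1)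
              = u.findIdx (· == '"') := by omega
          rw [hscan, h1, h2]
          simp only [Prod.mk.injEq]
          refine ⟨trivial, by push_cast; ring⟩
        · have hKeq : u.findIdx (· == '"') = u.length := by
            rw [List.findIdx_eq_length]
            intro a ha
            exact beq_eq_false_iff_ne.mpr (fun h => hqm (h ▸ ha))
          have hfv : PySem.Chars.find u ['"'] = -1 := by rw [hfs, if_neg hqm]
          rw [hfv]
          norm_num
          constructor
          · rw [hscan, hKeq]
            have h2 : j + 1 + u.length - (j + 1) = u.length := by omega
            rw [h2, List.take_length]
          · rw [hscan, hKeq]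
            push_cast
            omega
      · rw [if_neg hq, if_neg hq]
        have hscan := pvScanA_eq pvIsDelim cs (cs.length - j) j (le_refl _)
        rw [hscan]

-- ===== VERDICT (by name: the statement is the Claim_ definition above) =====
theorem parse_word_spec : Claim_equal_parse_word := by
  intro text index _ hpre
  unfold Spec_parse_word
  unfold Pre_parse_word at hpre
  exact pv_main text index hpre
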